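-- pv_equiv track=rewrite | github.com/yasha1971-coder/glyph-engine | tools/gap_probe_rerank_v1.py | best_chain
-- ===== SOURCE A (Python) =====
-- def best_chain(pos_lists, target_gap=176, tol=32):
--     if not pos_lists or not pos_lists[0]:
--         return 0, 0, 10**9, []
--
--     best_len = 0
--     best_pair_matches = 0
--     best_gap_error_sum = 10**9
--     best_chain_positions = []
--
--     for start_pos in pos_lists[0]:
--         chain = [start_pos]
--         pair_matches = 0
--         gap_error_sum = 0
--         prev = start_pos
--
--         for k in range(1, len(pos_lists)):
--             cand = pos_lists[k]
--             lo = prev + target_gap - tol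
--             hi = prev + target_gap + tol
--
--             best_next = None
--             best_err = None
--
--             for p in cand:
--                 if p < lo:
--                     continue
--                 if p > hi:
--                     break
--                 err = abs((p - prev) - target_gap)
--                 if best_next is None or err < best_err or (err == best_err and p < best_next):
--                     best_next = p
--                     best_err = err
--
--             if best_next is None:
--                 break
--
--             chain.append(best_next)
--             pair_matches += 1
--             gap_error_sum += best_err
--             prev = best_next
--
--         chain_len = len(chain)
--
--         if (
--             chain_len > best_len
--             or (chain_len == best_len and pair_matches > best_pair_matches)
--             or (chain_len == best_len and pair_matches == best_pair_matches and gap_error_sum < best_gap_error_sum)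
--         ):
--             best_len = chain_len
--             best_pair_matches = pair_matches
--             best_gap_error_sum = gap_error_sum
--             best_chain_positions = chain
--
--     return best_len, best_pair_matches, best_gap_error_sum, best_chain_positions
-- ===== SOURCE B (Python) =====
-- def best_chain(pos_lists, target_gap=176, tol=32):
--     if not pos_lists or not pos_lists[0]:
--         return 0, 0, 10**9, []
--     L = len(pos_lists)
--
--     def pick(cand, prev):
--         lo = prev + target_gap - tol
--         hi = prev + target_gap + tol
--         best_next = None
--         best_err = None
--         for p in cand:
--             if p < lo:
--                 continue
--             if p > hi:
--                 break
--             err = abs((p - prev) - target_gap)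
--             if best_next is None or err < best_err or (err == best_err and p < best_next):
--                 best_next = p
--                 best_err = err
--         return best_next, best_err
--
--     # conts[k][p] = (matches, err_sum, next_pos) of the greedy continuation
--     # starting at position p on level k; computed bottom-up, each (level, pos)
--     # pair exactly once.
--     conts = [None] * L
--     conts[L - 1] = {p: (0, 0, None) for p in pos_lists[L - 1]}
--     for k in range(L - 2, -1, -1):
--         table = {}
--         for p in pos_lists[k]:
--             if p in table:
--                 continue
--             nxt, err = pick(pos_lists[k + 1], p)
--             if nxt is None:
--                 table[p] = (0, 0, None)
--             else:
--                 m, e, _ = conts[k + 1][nxt]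
--                 table[p] = (m + 1, e + err, nxt)
--         conts[k] = table
--
--     best = None  # (start, matches, err_sum); first maximum wins
--     for s in pos_lists[0]:
--         m, e, _ = conts[0][s]
--         if best is None or (m, -e) > (best[1], -best[2]):
--             best = (s, m, e)
--
--     s, m, e = best
--     chain = [s]
--     p, k = s, 0
--     while True:
--         _, _, nxt = conts[k][p]
--         if nxt is None:
--             break
--         chain.append(nxt)
--         p, k = nxt, k + 1
--     return 1 + m, m, e, chain
-- ===== Notes on version B (the rewrite author's own statement) =====
-- stated objective: alternative
-- what changed: B replaces A's per-start greedy recomputation by a bottom-up memo table computing each (level, position) continuation exactly once, picking the best start with a single first-max pass and reconstructing the winning chain by walking stored next-pointers.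
import Mathlib
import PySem

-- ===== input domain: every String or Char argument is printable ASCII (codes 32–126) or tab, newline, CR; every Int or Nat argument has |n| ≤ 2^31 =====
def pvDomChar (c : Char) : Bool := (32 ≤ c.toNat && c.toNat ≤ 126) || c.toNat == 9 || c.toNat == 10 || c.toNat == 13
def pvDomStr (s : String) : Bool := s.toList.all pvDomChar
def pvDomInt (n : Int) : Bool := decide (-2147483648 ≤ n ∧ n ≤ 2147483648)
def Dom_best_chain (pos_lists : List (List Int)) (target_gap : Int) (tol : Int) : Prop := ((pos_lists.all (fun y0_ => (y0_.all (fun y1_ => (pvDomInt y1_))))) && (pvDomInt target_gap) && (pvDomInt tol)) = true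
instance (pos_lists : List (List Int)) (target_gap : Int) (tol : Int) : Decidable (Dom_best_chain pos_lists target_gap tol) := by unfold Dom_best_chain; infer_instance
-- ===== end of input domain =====

-- B replaces A's per-start greedy recomputation by a bottom-up memo table (one greedy
-- continuation per (level, position), chains reconstructed by pointer walking); objective: alternative.

-- ===== PORT A =====
-- A's innermost `for p in cand` loop (continue / break / best-so-far update)
def scanGo (prev g lo hi : Int) : List Int → Option (Int × Int) → Option (Int × Int)
  | [], acc => acc
  | p :: ps, acc =>
    if p < lo then scanGo prev g lo hi ps acc
    else if hi < p then acc
    else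
      scanGo prev g lo hi ps
        (match acc with
         | none => some (p, |p - prev - g|)
         | some (bn, be) =>
           if |p - prev - g| < be ∨ (|p - prev - g| = be ∧ p < bn) then some (p, |p - prev - g|)
           else some (bn, be))

-- A's `for k in range(1, len(pos_lists))` loop with break; returns (chain tail, pair_matches, gap_error_sum)
def growA (g t : Int) : List (List Int) → Int → List Int × Int × Int
  | [], _ => ([], 0, 0)
  | cand :: rest, prev =>
    match scanGo prev g (prev + g - t) (prev + g + t) cand none with
    | none => ([], 0, 0)
    | some (bn, be) =>
      let r := growA g t rest bn
      (bn :: r.1, r.2.1 + 1, r.2.2 + be)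

def best_chain (pos_lists : List (List Int)) (target_gap : Int) (tol : Int) : Int × Int × Int × List Int :=
  match pos_lists with
  | [] => (0, 0, 10 ^ 9, [])
  | first :: rest =>
    if first = [] then (0, 0, 10 ^ 9, [])
    else
      first.foldl (fun st s =>
        let r := growA target_gap tol rest s
        let chain := s :: r.1
        let cl : Int := chain.length
        if cl > st.1 ∨ (cl = st.1 ∧ r.2.1 > st.2.1) ∨ (cl = st.1 ∧ r.2.1 = st.2.1 ∧ r.2.2 < st.2.2.1)
        then (cl, r.2.1, r.2.2, chain) else st) (0, 0, 10 ^ 9, [])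

-- ===== PORT B =====
-- B's `pick` helper: same window scan as A's inner loop
def pickGo (prev g lo hi : Int) : List Int → Option (Int × Int) → Option (Int × Int)
  | [], acc => acc
  | p :: ps, acc =>
    if p < lo then pickGo prev g lo hi ps acc
    else if hi < p then acc
    else
      pickGo prev g lo hi ps
        (match acc with
         | none => some (p, |p - prev - g|)
         | some (bn, be) =>
           if |p - prev - g| < be ∨ (|p - prev - g| = be ∧ p < bn) then some (p, |p - prev - g|)
           else some (bn, be))

def pick (cand : List Int) (prev g t : Int) : Option (Int × Int) :=
  pickGo prev g (prev + g - t) (prev + g + t) cand none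

-- `{p: (0, 0, None) for p in pos_lists[L-1]}`
def baseDict (cand : List Int) : PySem.Dict Int (Int × Int × Option Int) :=
  cand.foldl (fun d p => d.insert p (0, 0, none)) PySem.Dict.empty

-- one pass of B's `for k in range(L-2, -1, -1)` loop body: memo table for one level.
-- Python looks `conts[k+1][nxt]` up directly; the key is always present (pick returns
-- an element of nextCand), so getD's default (0,0,none) is never used.
def levelDict (g t : Int) (cand nextCand : List Int) (next : PySem.Dict Int (Int × Int × Option Int)) :
    PySem.Dict Int (Int × Int × Option Int) :=
  cand.foldl (fun d p =>
    if d.contains p then d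
    else
      d.insert p
        (match pick nextCand p g t with
         | none => (0, 0, none)
         | some (bn, be) =>
           let r := next.getD bn (0, 0, none)
           (r.1 + 1, r.2.1 + be, some bn))) PySem.Dict.empty

-- the whole bottom-up construction of `conts`
def buildConts (g t : Int) : List (List Int) → List (PySem.Dict Int (Int × Int × Option Int))
  | [] => []
  | cand :: rest =>
    match rest, buildConts g t rest with
    | r0 :: _, c :: cs => levelDict g t cand r0 c :: c :: cs
    | _, _ => [baseDict cand]

-- B's final `while True` chain-reconstruction loop (getD's default is again unreachable)
def walkChain : List (PySem.Dict Int (Int × Int × Option Int)) → Int → List Int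
  | [], _ => []
  | d :: ds, p =>
    match d.getD p (0, 0, none) with
    | (_, _, some nxt) => nxt :: walkChain ds nxt
    | _ => []

def best_chain_alt (pos_lists : List (List Int)) (target_gap : Int) (tol : Int) : Int × Int × Int × List Int :=
  match pos_lists with
  | [] => (0, 0, 10 ^ 9, [])
  | first :: _ =>
    if first = [] then (0, 0, 10 ^ 9, [])
    else
      match buildConts target_gap tol pos_lists with
      | [] => (0, 0, 10 ^ 9, [])  -- unreachable: buildConts of a nonempty list is nonempty
      | c0 :: cs =>
        let best := first.foldl (fun b s =>
          let r := c0.getD s (0, 0, none)  -- `conts[0][s]`; key always present, default unreachable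
          match b with
          | none => some (s, r.1, r.2.1)
          | some (bs, bm, be) =>
            if r.1 > bm ∨ (r.1 = bm ∧ -r.2.1 > -be) then some (s, r.1, r.2.1) else some (bs, bm, be)) none
        match best with
        | none => (0, 0, 10 ^ 9, [])  -- unreachable: first is nonempty
        | some (s, m, e) => (1 + m, m, e, s :: walkChain (c0 :: cs) s)

-- ===== PRECONDITION & SPEC =====
def Spec_best_chain (pos_lists : List (List Int)) (target_gap : Int) (tol : Int) (out : Int × Int × Int × List Int) : Prop := out = best_chain_alt pos_lists target_gap tol
instance (pos_lists : List (List Int)) (target_gap : Int) (tol : Int) (out : Int × Int × Int × List Int) : Decidable (Spec_best_chain pos_lists target_gap tol out) := by unfold Spec_best_chain; infer_instance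

-- ===== CLAIM (what is proved, stated in full; the proofs are below) =====
def Claim_equal_best_chain : Prop := ∀ (pos_lists : List (List Int)) (target_gap : Int) (tol : Int), Dom_best_chain pos_lists target_gap tol → Spec_best_chain pos_lists target_gap tol (best_chain pos_lists target_gap tol)

-- ===== LEMMAS AND PROOFS =====

-- the summary B's memo table stores for a position: (matches, error sum, next position)
def fsum (g t : Int) (rest : List (List Int)) (p : Int) : Int × Int × Option Int :=
  ((growA g t rest p).2.1, (growA g t rest p).2.2, (growA g t rest p).1.head?)

-- the start position the selection fold ends up with
def selS (g t : Int) (rest : List (List Int)) (xs : List Int) (s : Int) : Int :=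
  xs.foldl (fun bs x =>
    if (growA g t rest x).2.1 > (growA g t rest bs).2.1 ∨
       ((growA g t rest x).2.1 = (growA g t rest bs).2.1 ∧ (growA g t rest x).2.2 < (growA g t rest bs).2.2)
    then x else bs) s

theorem pickGo_eq_scanGo (prev g lo hi : Int) (l : List Int) (acc : Option (Int × Int)) :
    pickGo prev g lo hi l acc = scanGo prev g lo hi l acc := by
  induction l generalizing acc with
  | nil => rfl
  | cons p ps ih => simp only [pickGo, scanGo, ih]

theorem scanGo_mem (prev g lo hi : Int) (l : List Int) (acc : Option (Int × Int)) (bn be : Int)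
    (h : scanGo prev g lo hi l acc = some (bn, be)) : bn ∈ l ∨ acc = some (bn, be) := by
  induction l generalizing acc with
  | nil => exact Or.inr h
  | cons p ps ih =>
    simp only [scanGo] at h
    split_ifs at h with h1 h2
    · rcases ih _ h with h' | h'
      · exact Or.inl (List.mem_cons_of_mem _ h')
      · exact Or.inr h'
    · exact Or.inr h
    · rcases ih _ h with h' | h'
      · exact Or.inl (List.mem_cons_of_mem _ h')
      · cases acc with
        | none =>
          simp only [Option.some.injEq, Prod.mk.injEq] at h'
          exact Or.inl (h'.1 ▸ List.mem_cons_self)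
        | some q =>
          obtain ⟨bn0, be0⟩ := q
          by_cases hc : |p - prev - g| < be0 ∨ (|p - prev - g| = be0 ∧ p < bn0)
          · simp only [if_pos hc, Option.some.injEq, Prod.mk.injEq] at h'
            exact Or.inl (h'.1 ▸ List.mem_cons_self)
          · simp only [if_neg hc] at h'
            exact Or.inr h'

theorem grow_len (g t : Int) (rest : List (List Int)) (p : Int) :
    ((growA g t rest p).1.length : Int) = (growA g t rest p).2.1 := by
  induction rest generalizing p with
  | nil => simp [growA]
  | cons cand rs ih =>
    simp only [growA]
    cases h : scanGo p g (p + g - t) (p + g + t) cand none with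
    | none => simp
    | some q =>
      obtain ⟨bn, be⟩ := q
      simp only [List.length_cons]
      push_cast
      rw [ih bn]

theorem grow_len_nonneg (g t : Int) (rest : List (List Int)) (p : Int) :
    0 ≤ (growA g t rest p).2.1 := by
  rw [← grow_len]; positivity

-- generic lemma: fold inserting a key-determined value
theorem foldl_insert_get? (f : Int → Int × Int × Option Int) (l : List Int)
    (d : PySem.Dict Int (Int × Int × Option Int)) (q : Int) :
    (l.foldl (fun d p => d.insert p (f p)) d).get? q
      = if q ∈ l then some (f q) else d.get? q := by
  induction l generalizing d with
  | nil => simp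
  | cons p ps ih =>
    simp only [List.foldl_cons, ih, PySem.Dict.get?_insert, List.mem_cons]
    by_cases hq : q ∈ ps
    · simp [hq]
    · by_cases hp : q = p <;> simp [hq, hp]

-- generic lemma: fold inserting a key-determined value, skipping present keys
theorem foldl_insertIfAbsent_get? (f : Int → Int × Int × Option Int) (l : List Int)
    (d : PySem.Dict Int (Int × Int × Option Int))
    (hd : ∀ q, d.get? q = none ∨ d.get? q = some (f q)) (q : Int) :
    (l.foldl (fun d p => if d.contains p then d else d.insert p (f p)) d).get? q
      = if q ∈ l then some (f q) else d.get? q := by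
  induction l generalizing d with
  | nil => simp
  | cons p ps ih =>
    simp only [List.foldl_cons]
    have hstep : ∀ q', (if d.contains p then d else d.insert p (f p)).get? q'
        = if q' = p then some (f p) else d.get? q' := by
      intro q'
      by_cases hc : d.contains p
      · simp only [if_pos hc]
        by_cases hqp : q' = p
        · subst hqp
          rcases hd q' with h | h
          · exfalso
            rw [PySem.Dict.contains_eq_isSome_get?, h] at hc
            simp at hc
          · simp [h]
        · simp [hqp]
      · simp [hc, PySem.Dict.get?_insert]
    have hd' : ∀ q', (if d.contains p then d else d.insert p (f p)).get? q' = none ∨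
        (if d.contains p then d else d.insert p (f p)).get? q' = some (f q') := by
      intro q'
      rw [hstep q']
      by_cases hqp : q' = p
      · subst hqp; simp
      · simp only [if_neg hqp]; exact hd q'
    rw [ih _ hd', hstep q]
    by_cases hq : q ∈ ps
    · simp [hq]
    · by_cases hp : q = p <;> simp [hq, hp]

theorem baseDict_get? (cand : List Int) (q : Int) :
    (baseDict cand).get? q = if q ∈ cand then some (0, 0, none) else none := by
  unfold baseDict
  rw [foldl_insert_get? (fun _ => (0, 0, none))]
  simp

theorem buildConts_spec (g t : Int) (rest : List (List Int)) (cand : List Int) :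
    ∃ c, buildConts g t (cand :: rest) = c :: buildConts g t rest ∧
      ∀ p ∈ cand, c.get? p = some (fsum g t rest p) := by
  induction rest generalizing cand with
  | nil =>
    refine ⟨baseDict cand, by simp [buildConts], ?_⟩
    intro p hp
    rw [baseDict_get?]
    simp [hp, fsum, growA]
  | cons r0 rs ih =>
    obtain ⟨c1, hc1, hs1⟩ := ih r0
    refine ⟨levelDict g t cand r0 c1, ?_, ?_⟩
    · show (match r0 :: rs, buildConts g t (r0 :: rs) with
        | r0' :: _, c :: cs => levelDict g t cand r0' c :: c :: cs
        | _, _ => [baseDict cand]) = _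
      rw [hc1]
    · intro p hp
      unfold levelDict
      rw [foldl_insertIfAbsent_get? _ _ _ (fun q => Or.inl (PySem.Dict.get?_empty q)) p, if_pos hp]
      congr 1
      rw [pick, pickGo_eq_scanGo]
      unfold fsum
      cases h : scanGo p g (p + g - t) (p + g + t) r0 none with
      | none => simp [growA, h]
      | some q =>
        obtain ⟨bn, be⟩ := q
        have hbn : bn ∈ r0 := by
          rcases scanGo_mem _ _ _ _ _ _ _ _ h with h' | h'
          · exact h'
          · simp at h'
        simp [PySem.Dict.getD_of_get?_eq_some _ _ (hs1 bn hbn), growA, h, fsum]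

theorem walk_spec (g t : Int) (rest : List (List Int)) (cand : List Int) (p : Int) (hp : p ∈ cand) :
    walkChain (buildConts g t (cand :: rest)) p = (growA g t rest p).1 := by
  induction rest generalizing cand p with
  | nil =>
    have : buildConts g t [cand] = [baseDict cand] := by simp [buildConts]
    rw [this]
    simp only [walkChain]
    simp [PySem.Dict.getD_of_get?_eq_some _ _ ((baseDict_get? cand p).trans (if_pos hp)), growA]
  | cons r0 rs ih =>
    obtain ⟨c, hc, hs⟩ := buildConts_spec g t (r0 :: rs) cand
    rw [hc]
    simp only [walkChain]
    simp only [PySem.Dict.getD_of_get?_eq_some _ _ (hs p hp), fsum, growA]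
    cases h : scanGo p g (p + g - t) (p + g + t) r0 none with
    | none => simp
    | some q =>
      obtain ⟨bn, be⟩ := q
      have hbn : bn ∈ r0 := by
        rcases scanGo_mem _ _ _ _ _ _ _ _ h with h' | h'
        · exact h'
        · simp at h'
      simp only [List.head?_cons]
      rw [ih r0 bn hbn]

-- A's outer-loop step, named for the proofs (syntactically the lambda in best_chain)
def astep (g t : Int) (rest : List (List Int)) : (Int × Int × Int × List Int) → Int → (Int × Int × Int × List Int) :=
  fun st s =>
    let r := growA g t rest s
    let chain := s :: r.1
    let cl : Int := chain.length
    if cl > st.1 ∨ (cl = st.1 ∧ r.2.1 > st.2.1) ∨ (cl = st.1 ∧ r.2.1 = st.2.1 ∧ r.2.2 < st.2.2.1)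
    then (cl, r.2.1, r.2.2, chain) else st

-- B's selection step with the dict lookup replaced by its value
def selAbsStep (g t : Int) (rest : List (List Int)) : Option (Int × Int × Int) → Int → Option (Int × Int × Int) :=
  fun b s =>
    match b with
    | none => some (s, (growA g t rest s).2.1, (growA g t rest s).2.2)
    | some (bs, bm, be) =>
      if (growA g t rest s).2.1 > bm ∨ ((growA g t rest s).2.1 = bm ∧ -(growA g t rest s).2.2 > -be)
      then some (s, (growA g t rest s).2.1, (growA g t rest s).2.2) else some (bs, bm, be)

theorem selS_nil (g t : Int) (rest : List (List Int)) (s : Int) : selS g t rest [] s = s := rfl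

theorem selS_cons (g t : Int) (rest : List (List Int)) (x : Int) (xs : List Int) (s : Int) :
    selS g t rest (x :: xs) s = selS g t rest xs
      (if (growA g t rest x).2.1 > (growA g t rest s).2.1 ∨
          ((growA g t rest x).2.1 = (growA g t rest s).2.1 ∧ (growA g t rest x).2.2 < (growA g t rest s).2.2)
       then x else s) := rfl

theorem selS_mem (g t : Int) (rest : List (List Int)) (xs : List Int) :
    ∀ s, selS g t rest xs s = s ∨ selS g t rest xs s ∈ xs := by
  induction xs with
  | nil => intro s; exact Or.inl rfl
  | cons x xs ih =>
    intro s
    rw [selS_cons]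
    by_cases hc : (growA g t rest x).2.1 > (growA g t rest s).2.1 ∨
        ((growA g t rest x).2.1 = (growA g t rest s).2.1 ∧ (growA g t rest x).2.2 < (growA g t rest s).2.2)
    · rw [if_pos hc]
      rcases ih x with h | h
      · exact Or.inr (by rw [h]; exact List.mem_cons_self)
      · exact Or.inr (List.mem_cons_of_mem _ h)
    · rw [if_neg hc]
      rcases ih s with h | h
      · exact Or.inl h
      · exact Or.inr (List.mem_cons_of_mem _ h)

theorem selAbs_fold (g t : Int) (rest : List (List Int)) (xs : List Int) :
    ∀ s, xs.foldl (selAbsStep g t rest) (some (s, (growA g t rest s).2.1, (growA g t rest s).2.2))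
      = some (selS g t rest xs s, (growA g t rest (selS g t rest xs s)).2.1,
              (growA g t rest (selS g t rest xs s)).2.2) := by
  induction xs with
  | nil => intro s; rw [List.foldl_nil, selS_nil]
  | cons x xs ih =>
    intro s
    rw [List.foldl_cons, selS_cons]
    have hstep : selAbsStep g t rest (some (s, (growA g t rest s).2.1, (growA g t rest s).2.2)) x
        = if (growA g t rest x).2.1 > (growA g t rest s).2.1 ∨
             ((growA g t rest x).2.1 = (growA g t rest s).2.1 ∧ -(growA g t rest x).2.2 > -(growA g t rest s).2.2)
          then some (x, (growA g t rest x).2.1, (growA g t rest x).2.2)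
          else some (s, (growA g t rest s).2.1, (growA g t rest s).2.2) := rfl
    rw [hstep]
    by_cases hc : (growA g t rest x).2.1 > (growA g t rest s).2.1 ∨
        ((growA g t rest x).2.1 = (growA g t rest s).2.1 ∧ (growA g t rest x).2.2 < (growA g t rest s).2.2)
    · rw [if_pos (by omega), if_pos hc]; exact ih x
    · rw [if_neg (by omega), if_neg hc]; exact ih s

theorem astep_eq (g t : Int) (rest : List (List Int)) (s bl bm be : Int) (bc : List Int) :
    astep g t rest (bl, bm, be, bc) s
      = if 1 + (growA g t rest s).2.1 > bl ∨
           (1 + (growA g t rest s).2.1 = bl ∧ (growA g t rest s).2.1 > bm) ∨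
           (1 + (growA g t rest s).2.1 = bl ∧ (growA g t rest s).2.1 = bm ∧ (growA g t rest s).2.2 < be)
        then (1 + (growA g t rest s).2.1, (growA g t rest s).2.1, (growA g t rest s).2.2,
              s :: (growA g t rest s).1)
        else (bl, bm, be, bc) := by
  have hcl : (((s :: (growA g t rest s).1).length : Nat) : Int) = 1 + (growA g t rest s).2.1 := by
    rw [List.length_cons]
    push_cast
    rw [grow_len]
    ring
  simp only [astep, hcl]

theorem astep_fold (g t : Int) (rest : List (List Int)) (xs : List Int) :
    ∀ s, xs.foldl (astep g t rest)
        (1 + (growA g t rest s).2.1, (growA g t rest s).2.1, (growA g t rest s).2.2, s :: (growA g t rest s).1)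
      = (1 + (growA g t rest (selS g t rest xs s)).2.1, (growA g t rest (selS g t rest xs s)).2.1,
         (growA g t rest (selS g t rest xs s)).2.2, selS g t rest xs s :: (growA g t rest (selS g t rest xs s)).1) := by
  induction xs with
  | nil => intro s; rw [List.foldl_nil, selS_nil]
  | cons x xs ih =>
    intro s
    rw [List.foldl_cons, astep_eq, selS_cons]
    by_cases hc : (growA g t rest x).2.1 > (growA g t rest s).2.1 ∨
        ((growA g t rest x).2.1 = (growA g t rest s).2.1 ∧ (growA g t rest x).2.2 < (growA g t rest s).2.2)
    · rw [if_pos (by omega), if_pos hc]; exact ih x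
    · rw [if_neg (by omega), if_neg hc]; exact ih s

theorem best_chain_spec : Claim_equal_best_chain := by
  intro pos_lists g t _
  unfold Spec_best_chain
  cases pos_lists with
  | nil => rfl
  | cons first rest =>
    by_cases hf : first = []
    · subst hf; rfl
    · obtain ⟨x, xs, rfl⟩ : ∃ x xs, first = x :: xs := by
        cases first with
        | nil => exact absurd rfl hf
        | cons a b => exact ⟨a, b, rfl⟩
      obtain ⟨c0, hc0, hs0⟩ := buildConts_spec g t rest (x :: xs)
      -- A's side
      have hA : best_chain ((x :: xs) :: rest) g t
          = (x :: xs).foldl (astep g t rest) (0, 0, 10 ^ 9, []) := by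
        show (if (x :: xs : List Int) = [] then ((0 : Int), (0 : Int), (10 : Int) ^ 9, ([] : List Int)) else _) = _
        rw [if_neg hf]
        rfl
      rw [hA, List.foldl_cons, astep_eq, if_pos (by have := grow_len_nonneg g t rest x; omega),
          astep_fold]
      -- B's side
      have hB : best_chain_alt ((x :: xs) :: rest) g t
          = (match (x :: xs).foldl (fun b s =>
                let r := c0.getD s (0, 0, none)
                match b with
                | none => some (s, r.1, r.2.1)
                | some (bs, bm, be) =>
                  if r.1 > bm ∨ (r.1 = bm ∧ -r.2.1 > -be) then some (s, r.1, r.2.1)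
                  else some (bs, bm, be)) none with
             | none => ((0 : Int), (0 : Int), (10 : Int) ^ 9, ([] : List Int))
             | some (s, m, e) => (1 + m, m, e, s :: walkChain (c0 :: buildConts g t rest) s)) := by
        show (if (x :: xs : List Int) = [] then ((0 : Int), (0 : Int), (10 : Int) ^ 9, ([] : List Int))
              else match buildConts g t ((x :: xs) :: rest) with
                   | [] => ((0 : Int), (0 : Int), (10 : Int) ^ 9, ([] : List Int))
                   | c0 :: cs => _) = _
        rw [if_neg hf, hc0]
      rw [hB]
      have hcongr : (x :: xs).foldl (fun b s =>
            let r := c0.getD s (0, 0, none)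
            match b with
            | none => some (s, r.1, r.2.1)
            | some (bs, bm, be) =>
              if r.1 > bm ∨ (r.1 = bm ∧ -r.2.1 > -be) then some (s, r.1, r.2.1)
              else some (bs, bm, be)) none
          = (x :: xs).foldl (selAbsStep g t rest) none := by
        apply PySem.List.foldl_congr_mem
        intro b s hs
        have hr : c0.getD s (0, 0, none) = fsum g t rest s :=
          PySem.Dict.getD_of_get?_eq_some _ _ (hs0 s hs)
        simp only [hr, fsum, selAbsStep]
      rw [hcongr, List.foldl_cons]
      have h1 : selAbsStep g t rest none x
          = some (x, (growA g t rest x).2.1, (growA g t rest x).2.2) := rfl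
      rw [h1, selAbs_fold]
      have hmem : selS g t rest xs x ∈ x :: xs := by
        rcases selS_mem g t rest xs x with h | h
        · rw [h]; exact List.mem_cons_self
        · exact List.mem_cons_of_mem _ h
      show _ = (1 + (growA g t rest (selS g t rest xs x)).2.1, (growA g t rest (selS g t rest xs x)).2.1,
        (growA g t rest (selS g t rest xs x)).2.2,
        selS g t rest xs x :: walkChain (c0 :: buildConts g t rest) (selS g t rest xs x))
      rw [← hc0, walk_spec g t rest (x :: xs) _ hmem]
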